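-- pv_equiv track=rewrite | github.com/ThenTech/BDA-Assignments | Plagiarism/Resources/submissions/submissions/2281372.py | cleanup_spaces
-- ===== SOURCE A (Python) =====
-- def cleanup_spaces(string):
--     while True:
--         if len(string) == 0 and string == "":
--             return string
--         if string[0]== " ":
--             string = string[1:]
--         elif string[0] != " ":
--             break
--
--     while True:
--         if string[-1]== " ":
--             string = string[:-2]
--         elif string[-1] != " ":
--             break
-- # buitenkanten zijn klaar
--     teller = 0
--     while teller < len(string):
--         if string[teller] == " ":
--             if string[teller+1] == " ":
--                 string = string[:teller] + string[teller+1:]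
--                 continue
--         teller = teller + 1
--     return string
-- ===== SOURCE B (Python) =====
-- def cleanup_spaces(string):
--     out = []
--     pending = False
--     for ch in string:
--         if ch == " ":
--             pending = bool(out)
--         else:
--             if pending:
--                 out.append(" ")
--             out.append(ch)
--             pending = False
--     return "".join(out)
-- ===== Notes on version B (the rewrite author's own statement) =====
-- stated objective: faster
-- what changed: Replaced A's three quadratic slice-rebuilding while-loops (char-by-char lstrip, two-at-a-time trailing strip, in-place double-space deletion) by one linear left-to-right pass with an output accumulator and a pending-space flag; B also fixes A's trailing loop, which chops TWO characters per trailing space and so eats non-space characters when the trailing-space run is odd.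
-- intended difference: On inputs whose string, after removal of leading spaces, ends in an odd-length run of spaces, A's trailing loop removes two characters per trailing space and so also deletes non-space characters, returning a shortened string, while B returns the intended trimmed/collapsed string. — e.g. on cleanup_spaces("ab "): A returns "a", B returns "ab"
import Mathlib
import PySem

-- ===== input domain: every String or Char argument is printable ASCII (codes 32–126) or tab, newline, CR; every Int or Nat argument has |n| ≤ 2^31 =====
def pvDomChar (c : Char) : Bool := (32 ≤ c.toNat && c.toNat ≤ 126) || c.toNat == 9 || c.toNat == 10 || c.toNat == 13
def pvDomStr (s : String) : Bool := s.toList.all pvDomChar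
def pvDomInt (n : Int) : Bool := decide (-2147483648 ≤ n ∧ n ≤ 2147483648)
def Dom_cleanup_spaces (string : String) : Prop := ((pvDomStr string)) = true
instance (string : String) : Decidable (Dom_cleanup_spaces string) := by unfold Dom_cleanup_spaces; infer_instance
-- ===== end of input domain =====

-- B replaces A's three quadratic slice-rebuilding while-loops by one linear pass with a
-- pending-space flag; where A's two-chars-per-trailing-space loop eats characters B returns
-- the intended trimmed/collapsed string (stated in D_), and where A raises IndexError
-- (excluded by Pre_) B still returns it.

-- ===== PORT A =====
-- loop 1: while string[0] == " ": string = string[1:]   (matching on the list is exact: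
-- c = string[0], rest = string[1:]; the empty case is where loop 1 returns "")
def pvLa (s : List Char) : List Char :=
  match s with
  | [] => []
  | c :: rest => if c = ' ' then pvLa rest else c :: rest

-- loop 2: while string[-1] == " ": string = string[:-2]
-- string[-1] is PySem.List.pyGet? s (-1); on the empty string Python raises IndexError
-- (outside Pre_; the isEmpty guard only makes the recursion total and returns junk []);
-- string[:-2] is s.take (s.length - 2), exact for every length (a negative stop clamps to 0).
def pvTb (s : List Char) : List Char :=
  if h : s.isEmpty then []  -- Python raises IndexError here (outside Pre_)
  else match PySem.List.pyGet? s (-1) with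
  | none => []
  | some c =>
    if c = ' ' then pvTb (s.take (s.length - 2)) else s
termination_by s.length
decreasing_by
  have hs : s ≠ [] := by simpa using h
  have : 0 < s.length := List.length_pos_iff.mpr hs
  rw [List.length_take]; omega

-- loop 3: the guard gives teller < len, so string[teller] is s[teller] (exact);
-- string[teller+1] is s[teller+1]? (none = IndexError, unreachable from A's entry point);
-- the removal string[:teller] + string[teller+1:] is s.take teller ++ s.drop (teller+1) (exact).
def pvMc (s : List Char) (teller : Nat) : List Char :=
  if h : teller < s.length then
    if s[teller] = ' ' then
      match s[teller+1]? with
      | some c2 =>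
        if c2 = ' ' then pvMc (s.take teller ++ s.drop (teller+1)) teller
        else pvMc s (teller+1)
      | none => []  -- Python raises IndexError here (unreachable from A's entry point)
    else pvMc s (teller+1)
  else s
termination_by s.length - teller
decreasing_by
  · simp; omega
  · omega
  · omega

def cleanup_spaces (string : String) : String :=
  if pvLa string.toList = [] then ""  -- loop 1's early 'return string' once all is stripped
  else String.ofList (pvMc (pvTb (pvLa string.toList)) 0)

-- ===== PORT B =====
-- the loop body of Source B: out is the accumulated result, pending an unemitted space
def pvStep (st : List Char × Bool) (ch : Char) : List Char × Bool :=
  if ch = ' ' then (st.1, !st.1.isEmpty)  -- pending = bool(out)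
  else ((if st.2 then st.1 ++ [' '] else st.1) ++ [ch], false)

def cleanup_spaces_alt (string : String) : String :=
  String.ofList (string.toList.foldl pvStep ([], false)).1

-- ===== PRECONDITION & SPEC =====
-- Pre_ excludes exactly the inputs on which A raises IndexError: when, after removing the
-- leading spaces, the string is nonempty of even length with every odd-index character a
-- space, A's trailing loop (which removes TWO characters per trailing space) empties the
-- string and string[-1] raises; on such inputs B returns the trimmed/collapsed string.
def Pre_cleanup_spaces (string : String) : Prop :=
  ¬ ((string.toList.dropWhile (· == ' ')) ≠ [] ∧
     (string.toList.dropWhile (· == ' ')).length % 2 = 0 ∧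
     ∀ i, i < (string.toList.dropWhile (· == ' ')).length → i % 2 = 1 →
       (string.toList.dropWhile (· == ' ')).getD i ' ' = ' ')
instance (string : String) : Decidable (Pre_cleanup_spaces string) := by
  unfold Pre_cleanup_spaces; infer_instance

def pvWitness_cleanup_spaces : String := " a  b "

-- When the string left after removing leading spaces ends in an ODD-length run of spaces,
-- A's trailing loop (two characters removed per trailing space) also deletes non-space
-- characters and returns a shortened string, while B returns the intended trimmed and
-- collapsed string, which is what trimming is meant to do.
def D_cleanup_spaces (string : String) : Prop :=
  ((string.toList.dropWhile (· == ' ')).reverse.takeWhile (· == ' ')).length % 2 = 1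
instance (string : String) : Decidable (D_cleanup_spaces string) := by
  unfold D_cleanup_spaces; infer_instance

def Spec_cleanup_spaces (string : String) (out : String) : Prop :=
  ¬ D_cleanup_spaces string → out = cleanup_spaces_alt string
instance (string : String) (out : String) : Decidable (Spec_cleanup_spaces string out) := by
  unfold Spec_cleanup_spaces; infer_instance

def pvDiffWitness_cleanup_spaces : String := "ab "
def pvDiffWitnessOut_cleanup_spaces : String × String := ("a", "ab")

-- ===== CLAIM (what is proved, stated in full; the proofs are below) =====
def Claim_unchanged_cleanup_spaces : Prop :=
  ∀ (string : String), Dom_cleanup_spaces string → Pre_cleanup_spaces string →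
    Spec_cleanup_spaces string (cleanup_spaces string)
def Claim_changed_cleanup_spaces : Prop :=
  Dom_cleanup_spaces (pvDiffWitness_cleanup_spaces) ∧
  Pre_cleanup_spaces (pvDiffWitness_cleanup_spaces) ∧
  D_cleanup_spaces (pvDiffWitness_cleanup_spaces) ∧
  cleanup_spaces (pvDiffWitness_cleanup_spaces) = pvDiffWitnessOut_cleanup_spaces.1 ∧
  cleanup_spaces_alt (pvDiffWitness_cleanup_spaces) = pvDiffWitnessOut_cleanup_spaces.2 ∧
  pvDiffWitnessOut_cleanup_spaces.1 ≠ pvDiffWitnessOut_cleanup_spaces.2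
def Claim_exact_cleanup_spaces : Prop :=
  ∀ (string : String), Dom_cleanup_spaces string → Pre_cleanup_spaces string →
    D_cleanup_spaces string → cleanup_spaces string ≠ cleanup_spaces_alt string

-- ===== LEMMAS AND PROOFS =====

-- the canonical collapsed form: every run of spaces shrunk to a single space
def pvCf : List Char → List Char
  | [] => []
  | [a] => [a]
  | a :: b :: r => if a = ' ' ∧ b = ' ' then pvCf (b :: r) else a :: pvCf (b :: r)

def pvLtrim (l : List Char) : List Char := l.dropWhile (· == ' ')
def pvRtrim (l : List Char) : List Char := (l.reverse.dropWhile (· == ' ')).reverse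
def pvTrail (l : List Char) : Nat := (l.reverse.takeWhile (· == ' ')).length

lemma pvRtrim_decomp (l : List Char) :
    l = pvRtrim l ++ List.replicate (pvTrail l) ' ' := by
  unfold pvRtrim pvTrail
  have htw : l.reverse.takeWhile (· == ' ') = List.replicate (l.reverse.takeWhile (· == ' ')).length ' ' := by
    apply List.eq_replicate_of_mem
    intro b hb
    have := List.mem_takeWhile_imp hb
    simpa using this
  conv_lhs => rw [← l.reverse_reverse, ← List.takeWhile_append_dropWhile (p := (· == ' ')) (l := l.reverse)]
  rw [List.reverse_append]
  congr 1
  rw [← List.reverse_replicate, ← htw]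

lemma pvRtrim_getLastD (l : List Char) : (pvRtrim l).getLastD '.' ≠ ' ' := by
  unfold pvRtrim
  rcases h : l.reverse.dropWhile (· == ' ') with _ | ⟨c, r⟩
  · simp
  · have hne : l.reverse.dropWhile (· == ' ') ≠ [] := by simp [h]
    have hc := List.head_dropWhile_not (· == ' ') hne
    simp only [h, List.head_cons] at hc
    have : (c :: r).reverse.getLastD '.' = c := by
      simp [List.getLastD_eq_getLast?]
    rw [this]
    simpa using hc

lemma pvCf_ne_nil (x : List Char) (h : x ≠ []) : pvCf x ≠ [] := by
  match x with
  | [a] => simp [pvCf]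
  | a :: b :: r =>
    have := pvCf_ne_nil (b :: r) (by simp)
    simp only [pvCf]
    split <;> simp_all

lemma pvCf_concat (v : List Char) (c : Char) (hv : v ≠ []) :
    pvCf (v ++ [c]) = if v.getLastD '.' = ' ' ∧ c = ' ' then pvCf v else pvCf v ++ [c] := by
  match v with
  | [a] =>
    simp only [List.cons_append, List.nil_append, pvCf,
      show [a].getLastD '.' = a from rfl]
    split_ifs with h1 h2 h2 <;> simp_all
  | a :: b :: r =>
    have ih := pvCf_concat (b :: r) c (by simp)
    have hgl : (a :: b :: r).getLastD '.' = (b :: r).getLastD '.' := by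
      simp [List.getLastD_eq_getLast?, List.getLast?_cons_cons]
    show pvCf (a :: b :: (r ++ [c])) = _
    rw [hgl]
    by_cases hab : a = ' ' ∧ b = ' '
    · rw [show pvCf (a :: b :: (r ++ [c])) = pvCf (b :: (r ++ [c])) by simp [pvCf, hab],
        show pvCf (a :: b :: r) = pvCf (b :: r) by simp [pvCf, hab]]
      exact ih
    · rw [show pvCf (a :: b :: (r ++ [c])) = a :: pvCf (b :: (r ++ [c])) by simp [pvCf, hab],
        show pvCf (a :: b :: r) = a :: pvCf (b :: r) by simp [pvCf, hab]]
      rw [show (b :: (r ++ [c])) = (b :: r) ++ [c] by simp]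
      rw [ih]
      split_ifs <;> simp

lemma pvCf_spaces (v : List Char) (k : Nat) (hv : v ≠ []) (hP : v.getLastD '.' ≠ ' ') :
    pvCf (v ++ List.replicate k ' ') = if k = 0 then pvCf v else pvCf v ++ [' '] := by
  induction k with
  | zero => simp
  | succ k ih =>
    rw [show List.replicate (k+1) ' ' = List.replicate k ' ' ++ [' '] by
      rw [← List.replicate_succ']]
    rw [← List.append_assoc, pvCf_concat _ _ (by simp [hv]), ih]
    rcases Nat.eq_zero_or_pos k with hk | hk
    · subst hk
      rw [List.getLastD_eq_getLast?] at hP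
      simp [hP]
    · have hlast : (v ++ List.replicate k ' ').getLastD '.' = ' ' := by
        rw [List.getLastD_eq_getLast?, List.getLast?_append_of_ne_nil _ (by simp; omega)]
        rw [List.getLast?_replicate]
        simp [Nat.pos_iff_ne_zero.mp hk]
      have hr : (List.replicate k ' ').getLast?.getD (v.getLast?.getD '.') = ' ' := by
        rw [List.getLast?_replicate]
        simp [Nat.pos_iff_ne_zero.mp hk]
      simp [Nat.pos_iff_ne_zero.mp hk, hr]

lemma getLast?_dropWhile_of_ne_nil (q : Char → Bool) (p : List Char)
    (h : p.dropWhile q ≠ []) : (p.dropWhile q).getLast? = p.getLast? := by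
  induction p with
  | nil => simp at h
  | cons a w ih =>
    by_cases ha : q a
    · rw [List.dropWhile_cons_of_pos ha] at h ⊢
      rw [ih h, List.getLast?_cons]
      rcases w with _ | _
      · simp [List.dropWhile] at h
      · simp [List.getLast?_cons]
    · rw [List.dropWhile_cons_of_neg ha]

lemma pvLtrim_head (p : List Char) (h : pvLtrim p ≠ []) : (pvLtrim p).headD ' ' ≠ ' ' := by
  have hb := List.head_dropWhile_not (· == ' ') (l := p) h
  have h2 : (pvLtrim p).headD ' ' = (pvLtrim p).head h := by
    rw [List.headD_eq_head?, List.head?_eq_some_head h]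
    rfl
  rw [h2]
  simpa using hb

lemma pvRtrim_ltrim_ne_nil (p : List Char) (h : pvLtrim p ≠ []) : pvRtrim (pvLtrim p) ≠ [] := by
  intro hz
  have hd := pvRtrim_decomp (pvLtrim p)
  rw [hz, List.nil_append] at hd
  have hh := pvLtrim_head p h
  rcases hk : pvTrail (pvLtrim p) with _ | k
  · rw [hk] at hd; simp at hd; exact h hd
  · rw [hk] at hd
    rw [hd] at hh
    simp [List.replicate_succ] at hh

lemma pvTrail_zero_iff (x : List Char) (hx : x ≠ []) :
    pvTrail x = 0 ↔ x.getLastD '.' ≠ ' ' := by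
  unfold pvTrail
  rcases hr : x.reverse with _ | ⟨a, w⟩
  · simp at hr; exact absurd hr hx
  · have hga : x.getLastD '.' = a := by
      rw [List.getLastD_eq_getLast?, ← List.head?_reverse, hr]; rfl
    rw [hga]
    by_cases ha : a = ' '
    · simp [List.takeWhile_cons, ha]
    · simp [List.takeWhile_cons, ha]

lemma pvRtrim_append_nonspace (y : List Char) (c : Char) (hc : c ≠ ' ') :
    pvRtrim (y ++ [c]) = y ++ [c] := by
  unfold pvRtrim
  rw [List.reverse_append]
  simp [List.dropWhile_cons, hc]

lemma pvRtrim_append_space (y : List Char) :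
    pvRtrim (y ++ [' ']) = pvRtrim y := by
  unfold pvRtrim
  rw [List.reverse_append]
  simp [List.dropWhile_cons]

lemma pvFoldB (l : List Char) :
    l.foldl pvStep ([], false) =
      (pvCf (pvRtrim (pvLtrim l)), !(pvLtrim l).isEmpty && (l.getLastD '.' == ' ')) := by
  induction l using List.reverseRecOn with
  | nil => simp [pvLtrim, pvRtrim, pvCf]
  | append_singleton p c ih =>
    rw [List.foldl_append, ih, List.foldl_cons, List.foldl_nil]
    by_cases hc : c = ' '
    · subst hc
      by_cases hE : pvLtrim p = []
      · have h1 : pvLtrim (p ++ [' ']) = [] := by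
          unfold pvLtrim at hE ⊢
          rw [List.dropWhile_append]
          simp [hE]
        rw [h1, hE]
        simp [pvStep, pvRtrim, pvCf]
      · have h1 : pvLtrim (p ++ [' ']) = pvLtrim p ++ [' '] := by
          unfold pvLtrim at hE ⊢
          rw [List.dropWhile_append]
          simp [hE]
        have hnn : pvCf (pvRtrim (pvLtrim p)) ≠ [] :=
          pvCf_ne_nil _ (pvRtrim_ltrim_ne_nil p hE)
        have e1 : (pvCf (pvRtrim (pvLtrim p))).isEmpty = false := by
          simp [List.isEmpty_iff, hnn]
        rw [h1, pvRtrim_append_space]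
        simp [pvStep, e1]
    · have h1 : pvLtrim (p ++ [c]) = pvLtrim p ++ [c] := by
        unfold pvLtrim
        rw [List.dropWhile_append]
        by_cases hE : pvLtrim p = [] <;> unfold pvLtrim at hE <;> simp [hE, hc]
      rw [h1, pvRtrim_append_nonspace _ _ hc]
      by_cases hE : pvLtrim p = []
      · rw [hE]
        simp [pvStep, hc, hE, pvRtrim, pvCf]
      · have hv : pvRtrim (pvLtrim p) ≠ [] := pvRtrim_ltrim_ne_nil p hE
        have hvP : (pvRtrim (pvLtrim p)).getLastD '.' ≠ ' ' := pvRtrim_getLastD _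
        have hdec := pvRtrim_decomp (pvLtrim p)
        have hcf : pvCf (pvLtrim p ++ [c]) =
            (if pvTrail (pvLtrim p) = 0 then pvCf (pvRtrim (pvLtrim p))
             else pvCf (pvRtrim (pvLtrim p)) ++ [' ']) ++ [c] := by
          conv_lhs => rw [hdec]
          rw [List.append_assoc] at *
          rw [← List.append_assoc, pvCf_concat _ _ (by simp [hv]),
            if_neg (by simp [hc]), pvCf_spaces _ _ hv hvP]
        have hflag : (p.getLastD '.' == ' ') = decide (pvTrail (pvLtrim p) ≠ 0) := by
          have hgl : p.getLastD '.' = (pvLtrim p).getLastD '.' := by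
            rw [List.getLastD_eq_getLast?, List.getLastD_eq_getLast?,
              ← getLast?_dropWhile_of_ne_nil (· == ' ') p hE]
            rfl
          rw [hgl]
          rcases eq_or_ne ((pvLtrim p).getLastD '.') ' ' with h2 | h2
          · have h0 : pvTrail (pvLtrim p) ≠ 0 := fun h0 =>
              (pvTrail_zero_iff _ hE).mp h0 h2
            rw [List.getLastD_eq_getLast?] at h2
            simp [h2, h0]
          · have h0 : pvTrail (pvLtrim p) = 0 := (pvTrail_zero_iff _ hE).mpr h2
            rw [List.getLastD_eq_getLast?] at h2
            simp [h2, h0]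
        rw [hcf]
        simp only [pvStep, if_neg hc, hflag]
        rcases Nat.eq_zero_or_pos (pvTrail (pvLtrim p)) with hk | hk
        · simp [hk, hE, hc]
        · simp [Nat.pos_iff_ne_zero.mp hk, hE, hc]

lemma pvTb_eq (v : List Char) (k : Nat) (hv : v ≠ []) (hP : v.getLastD '.' ≠ ' ') :
    pvTb (v ++ List.replicate (2 * k) ' ') = v := by
  induction k with
  | zero =>
    rw [pvTb.eq_def]
    have hl : v.getLast? = some (v.getLastD '.') := by
      rw [List.getLastD_eq_getLast?]
      rcases h : v.getLast? with _ | a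
      · exact absurd (List.getLast?_eq_none_iff.mp h) hv
      · rfl
    simp only [Nat.mul_zero, List.replicate_zero, List.append_nil]
    rw [dif_neg (by simpa using hv), PySem.List.pyGet?_neg_one, hl]
    simp only []
    rw [if_neg hP]
  | succ k ih =>
    rw [pvTb.eq_def]
    have hlast : (v ++ List.replicate (2 * (k + 1)) ' ').getLast? = some ' ' := by
      rw [List.getLast?_append_of_ne_nil v (by simp)]
      simp [List.getLast?_replicate]
    have htake : (v ++ List.replicate (2 * (k + 1)) ' ').take
        ((v ++ List.replicate (2 * (k + 1)) ' ').length - 2) = v ++ List.replicate (2 * k) ' ' := by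
      have h1 : (v ++ List.replicate (2 * (k + 1)) ' ').length - 2 = v.length + 2 * k := by
        simp; omega
      rw [h1, List.take_length_add_append, List.take_replicate]
      congr 2
      omega
    rw [dif_neg (by simp [hv]), PySem.List.pyGet?_neg_one, hlast]
    simp only [if_true]
    rw [htake]
    exact ih

lemma pvMc_eq (s : List Char) (t : Nat) :
    s.getLastD '.' ≠ ' ' → pvMc s t = s.take t ++ pvCf (s.drop t) := by
  fun_induction pvMc s t
  case case1 s t hlt hsp heq ih =>
    intro hP
    have ht1 : t + 1 < s.length := by
      by_contra hge
      rw [List.getElem?_eq_none (by omega)] at heq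
      simp at heq
    have hdrop_ne : s.drop (t+1) ≠ [] := by
      intro h; have := congrArg List.length h; simp at this; omega
    have hlast' : (s.take t ++ s.drop (t+1)).getLastD '.' = s.getLastD '.' := by
      rw [List.getLastD_eq_getLast?, List.getLastD_eq_getLast?,
        List.getLast?_append_of_ne_nil _ hdrop_ne, List.getLast?_drop,
        if_neg (by omega : ¬ s.length ≤ t + 1)]
    rw [ih (by rw [hlast']; exact hP)]
    have htk : t ≤ s.length := by omega
    have h1 : (s.take t ++ s.drop (t+1)).take t = s.take t := by
      rw [List.take_append_of_le_length (by simp; omega), List.take_take]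
      simp
    have h2 : (s.take t ++ s.drop (t+1)).drop t = s.drop (t+1) := by
      rw [List.drop_append_of_le_length (by simp; omega)]
      simp
    rw [h1, h2]
    congr 1
    have hd1 : s.drop t = s[t] :: s.drop (t+1) := List.drop_eq_getElem_cons hlt
    have hd2 : s.drop (t+1) = s[t+1] :: s.drop (t+2) := List.drop_eq_getElem_cons ht1
    have hc2' : s[t+1] = ' ' := by
      have := List.getElem?_eq_getElem ht1
      rw [heq] at this; exact (Option.some.injEq _ _).mp this.symm
    rw [hd1, hd2, hsp, hc2']
    simp [pvCf]
  case case2 s t hlt hsp c2 heq hc2 ih =>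
    intro hP
    rw [ih hP]
    have ht1 : t + 1 < s.length := by
      by_contra hge
      rw [List.getElem?_eq_none (by omega)] at heq
      simp at heq
    have hd1 : s.drop t = s[t] :: s.drop (t+1) := List.drop_eq_getElem_cons hlt
    have hd2 : s.drop (t+1) = s[t+1] :: s.drop (t+2) := List.drop_eq_getElem_cons ht1
    have hc2' : s[t+1] = c2 := by
      have := List.getElem?_eq_getElem ht1
      rw [heq] at this; exact (Option.some.injEq _ _).mp this.symm
    have htsucc : s.take (t+1) = s.take t ++ [s[t]] := by
      rw [List.take_add_one, List.getElem?_eq_getElem hlt]; rfl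
    rw [htsucc, hd1, hd2, hsp, hc2']
    simp [pvCf, hc2]
  case case3 s t hlt hsp heq =>
    intro hP
    exfalso
    have ht1 : s.length ≤ t + 1 := by
      by_contra hge
      rw [List.getElem?_eq_getElem (by omega)] at heq
      simp at heq
    have hteq : t = s.length - 1 := by omega
    have hlast : s.getLast? = some s[t] := by
      rw [List.getLast?_eq_getElem?, show s.length - 1 = t by omega,
        List.getElem?_eq_getElem hlt]
    rw [List.getLastD_eq_getLast?, hlast] at hP
    simp [hsp] at hP
  case case4 s t hlt hsp ih =>
    intro hP
    rw [ih hP]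
    have htsucc : s.take (t+1) = s.take t ++ [s[t]] := by
      rw [List.take_add_one, List.getElem?_eq_getElem hlt]; rfl
    have hd1 : s.drop t = s[t] :: s.drop (t+1) := List.drop_eq_getElem_cons hlt
    rcases hd : s.drop (t+1) with _ | ⟨b, r⟩
    · rw [htsucc, hd1, hd]
      simp [pvCf]
    · rw [htsucc, hd1, hd]
      simp only [List.append_assoc, List.cons_append, List.nil_append]
      congr 1
      show s[t] :: pvCf (b :: r) = pvCf (s[t] :: b :: r)
      simp [pvCf, hsp]
  case case5 s t hge =>
    intro _
    rw [List.take_of_length_le (by omega), List.drop_of_length_le (by omega)]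
    simp [pvCf]

lemma pvLa_eq (l : List Char) : pvLa l = pvLtrim l := by
  induction l with
  | nil => rfl
  | cons c rest ih =>
    by_cases hc : c = ' '
    · unfold pvLtrim
      rw [List.dropWhile_cons_of_pos (by simpa using hc)]
      simpa [pvLa, hc, pvLtrim] using ih
    · unfold pvLtrim
      rw [List.dropWhile_cons_of_neg (by simpa using hc)]
      simp [pvLa, hc]

-- the number of non-space characters, the measure that separates A and B inside D_
def pvNs (l : List Char) : Nat := (l.filter (· ≠ ' ')).length

lemma pvNs_take_le (w : List Char) (n : Nat) : pvNs (w.take n) ≤ pvNs w :=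
  ((List.take_sublist n w).filter _).length_le

lemma pvTb_ns_le (s : List Char) : pvNs (pvTb s) ≤ pvNs s := by
  fun_induction pvTb s
  case case1 => simp [pvNs]
  case case2 => simp [pvNs]
  case case3 =>
    rename_i s h heq ih
    exact le_trans ih (pvNs_take_le s _)
  case case4 => exact le_rfl

lemma pvTb_getLastD (s : List Char) : (pvTb s).getLastD '.' ≠ ' ' := by
  fun_induction pvTb s
  case case1 => simp
  case case2 => simp
  case case3 =>
    rename_i s h heq ih
    exact ih
  case case4 =>
    rename_i s h c heq hc
    have : s.getLast? = some c := by rwa [PySem.List.pyGet?_neg_one] at heq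
    rw [List.getLastD_eq_getLast?, this]
    simpa using hc

lemma pvTb_odd (v : List Char) (k : Nat) (hv : v ≠ []) (hP : v.getLastD '.' ≠ ' ') :
    pvTb (v ++ List.replicate (2 * k + 1) ' ') = pvTb v.dropLast := by
  induction k with
  | zero =>
    rw [pvTb.eq_def]
    have hlast : (v ++ List.replicate 1 ' ').getLast? = some ' ' := by
      rw [List.getLast?_append_of_ne_nil v (by simp)]
      rfl
    have htake : (v ++ List.replicate 1 ' ').take
        ((v ++ List.replicate 1 ' ').length - 2) = v.dropLast := by
      have h1 : (v ++ List.replicate 1 ' ').length - 2 = v.length - 1 := by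
        simp
      rw [h1, List.take_append_of_le_length (by omega), List.dropLast_eq_take]
    rw [dif_neg (by simp [hv]), PySem.List.pyGet?_neg_one, hlast]
    simp only [if_true]
    rw [htake]
  | succ k ih =>
    rw [pvTb.eq_def]
    have hlast : (v ++ List.replicate (2 * (k + 1) + 1) ' ').getLast? = some ' ' := by
      rw [List.getLast?_append_of_ne_nil v (by simp)]
      simp [List.getLast?_replicate]
    have htake : (v ++ List.replicate (2 * (k + 1) + 1) ' ').take
        ((v ++ List.replicate (2 * (k + 1) + 1) ' ').length - 2) =
        v ++ List.replicate (2 * k + 1) ' ' := by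
      have h1 : (v ++ List.replicate (2 * (k + 1) + 1) ' ').length - 2 = v.length + (2 * k + 1) := by
        simp; omega
      rw [h1, List.take_length_add_append, List.take_replicate]
      congr 2
      omega
    rw [dif_neg (by simp [hv]), PySem.List.pyGet?_neg_one, hlast]
    simp only [if_true]
    rw [htake]
    exact ih

lemma pvNs_append (a b : List Char) : pvNs (a ++ b) = pvNs a + pvNs b := by
  simp [pvNs]

lemma pvNs_cf (x : List Char) : pvNs (pvCf x) = pvNs x := by
  match x with
  | [] => rfl
  | [a] => rfl
  | a :: b :: r =>
    have ih := pvNs_cf (b :: r)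
    simp only [pvCf]
    split
    · rename_i hab
      rw [ih]
      simp [pvNs, hab.1]
    · rw [show pvNs (a :: pvCf (b :: r)) = pvNs [a] + pvNs (pvCf (b :: r)) from pvNs_append [a] _,
        show pvNs (a :: b :: r) = pvNs [a] + pvNs (b :: r) from pvNs_append [a] _, ih]

lemma pvNs_dropLast (v : List Char) (hv : v ≠ []) (hP : v.getLastD '.' ≠ ' ') :
    pvNs v = pvNs v.dropLast + 1 := by
  conv_lhs => rw [← List.dropLast_append_getLast hv]
  rw [pvNs_append]
  have : v.getLast hv = v.getLastD '.' := by
    rw [List.getLastD_eq_getLast?, List.getLast?_eq_getLast_of_ne_nil hv]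
    rfl
  rw [show pvNs [v.getLast hv] = 1 by
    rw [this]
    rw [List.getLastD_eq_getLast?] at hP ⊢
    simp [pvNs, List.filter_cons, hP]]


-- ===== VERDICT (by name: the statement is the Claim_ definition above) =====
theorem cleanup_spaces_spec : Claim_unchanged_cleanup_spaces := by
  intro s _hdom _hpre hnd
  have hnd' : ¬ pvTrail (pvLtrim s.toList) % 2 = 1 := hnd
  show (if pvLa s.toList = [] then "" else
      String.ofList (pvMc (pvTb (pvLa s.toList)) 0)) = cleanup_spaces_alt s
  unfold cleanup_spaces_alt
  rw [pvFoldB, pvLa_eq]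
  by_cases hE : pvLtrim s.toList = []
  · rw [if_pos hE, hE]
    rfl
  · rw [if_neg hE]
    have hv : pvRtrim (pvLtrim s.toList) ≠ [] := pvRtrim_ltrim_ne_nil s.toList hE
    have hvP : (pvRtrim (pvLtrim s.toList)).getLastD '.' ≠ ' ' := pvRtrim_getLastD _
    have hk : pvTrail (pvLtrim s.toList) = 2 * (pvTrail (pvLtrim s.toList) / 2) := by omega
    have htb : pvTb (pvLtrim s.toList) = pvRtrim (pvLtrim s.toList) := by
      conv_lhs => rw [pvRtrim_decomp (pvLtrim s.toList), hk]
      exact pvTb_eq _ _ hv hvP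
    rw [htb, pvMc_eq _ 0 hvP]
    simp

theorem cleanup_spaces_changed : Claim_changed_cleanup_spaces := by
  unfold Claim_changed_cleanup_spaces
  refine ⟨by decide, by decide, by decide, ?_, by decide, by decide⟩
  show cleanup_spaces "ab " = "a"
  have h3 : pvLa "ab ".toList = ['a', 'b', ' '] := by decide
  have h1 : pvTb ['a', 'b', ' '] = ['a'] := by
    rw [pvTb.eq_def]
    norm_num [PySem.List.pyGet?, PySem.List.pyIdx?]
    rw [pvTb.eq_def]
    norm_num [PySem.List.pyGet?, PySem.List.pyIdx?]
    intro h
    exact absurd h (by decide)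
  have h2 : pvMc ['a'] 0 = ['a'] := by
    have := pvMc_eq ['a'] 0 (by decide)
    simpa [pvCf] using this
  unfold cleanup_spaces
  rw [h3, if_neg (by decide), h1, h2]

theorem cleanup_spaces_tight : Claim_exact_cleanup_spaces := by
  intro s _hdom _hpre hD hEq
  have hD' : pvTrail (pvLtrim s.toList) % 2 = 1 := hD
  have hu : pvLtrim s.toList ≠ [] := by
    intro h
    rw [h] at hD'
    simp [pvTrail] at hD'
  unfold cleanup_spaces cleanup_spaces_alt at hEq
  rw [pvLa_eq, if_neg hu, pvFoldB] at hEq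
  have hlists : pvMc (pvTb (pvLtrim s.toList)) 0 = pvCf (pvRtrim (pvLtrim s.toList)) := by
    have := congrArg String.toList hEq
    simpa using this
  have hv : pvRtrim (pvLtrim s.toList) ≠ [] := pvRtrim_ltrim_ne_nil s.toList hu
  have hvP : (pvRtrim (pvLtrim s.toList)).getLastD '.' ≠ ' ' := pvRtrim_getLastD _
  obtain ⟨j, hj⟩ : ∃ j, pvTrail (pvLtrim s.toList) = 2 * j + 1 :=
    ⟨pvTrail (pvLtrim s.toList) / 2, by omega⟩
  have htb : pvTb (pvLtrim s.toList) = pvTb (pvRtrim (pvLtrim s.toList)).dropLast := by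
    conv_lhs => rw [pvRtrim_decomp (pvLtrim s.toList), hj]
    exact pvTb_odd _ _ hv hvP
  have h1 : pvNs (pvMc (pvTb (pvLtrim s.toList)) 0) = pvNs (pvTb (pvLtrim s.toList)) := by
    rw [pvMc_eq _ 0 (pvTb_getLastD _)]
    simpa using pvNs_cf _
  have h3 : pvNs (pvTb (pvLtrim s.toList)) ≤ pvNs (pvRtrim (pvLtrim s.toList)).dropLast := by
    rw [htb]
    exact pvTb_ns_le _
  have h4 : pvNs (pvRtrim (pvLtrim s.toList)) =
      pvNs (pvRtrim (pvLtrim s.toList)).dropLast + 1 := pvNs_dropLast _ hv hvP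
  have h5 : pvNs (pvCf (pvRtrim (pvLtrim s.toList))) = pvNs (pvRtrim (pvLtrim s.toList)) :=
    pvNs_cf _
  rw [hlists, h5] at h1
  omega
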